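-- pv_equiv track=rewrite | github.com/Mmahaha/13water | normal.py | zhao_san
-- ===== SOURCE A (Python) =====
-- def flag(x):
--     if (x[1] == 'A'):
--         return 14
--     elif (x[1] == '1'):
--         return 10
--     elif (x[1] == 'J'):
--         return 11
--     elif (x[1] == 'Q'):
--         return 12
--     elif (x[1] == 'K'):
--         return 13
--     else:
--         return ord(x[1]) - 48
--
-- def zhao_san(cards):
--     s = cards[0:1]
--     for i in range(len(cards) - 1):
--         if flag(cards[i + 1]) == flag(cards[i]):
--             s.append(cards[i + 1])
--             if len(s) == 3:
--                 break
--         else: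
--             s = cards[i + 1:i + 2]
--     return s
-- ===== SOURCE B (Python) =====
-- def flag(x):
--     if (x[1] == 'A'):
--         return 14
--     elif (x[1] == '1'):
--         return 10
--     elif (x[1] == 'J'):
--         return 11
--     elif (x[1] == 'Q'):
--         return 12
--     elif (x[1] == 'K'):
--         return 13
--     else:
--         return ord(x[1]) - 48
--
-- def zhao_san(cards):
--     keys = [flag(c) for c in cards]
--     n = len(cards)
--     for i in range(n - 2):
--         if keys[i] == keys[i + 1] == keys[i + 2]:
--             return cards[i:i + 3]
--     if not cards:
--         return []
--     j = n - 1
--     while j > 0 and keys[j] == keys[j - 1]: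
--         j -= 1
--     return cards[j:]
-- ===== Notes on version B (the rewrite author's own statement) =====
-- stated objective: alternative
-- what changed: Replaces A's single forward pass with a mutable run accumulator and break by two staged scans over a precomputed key array: a sliding 3-window scan for the first index with three equal consecutive keys (returning that slice), and, failing that, a backward scan from the end for the start index of the trailing run.
-- outside the precondition, e.g. on zhao_san(['sA', 'hA', 'dA', 'x']): A returns ['sA', 'hA', 'dA'], B raises IndexError
import Mathlib
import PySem

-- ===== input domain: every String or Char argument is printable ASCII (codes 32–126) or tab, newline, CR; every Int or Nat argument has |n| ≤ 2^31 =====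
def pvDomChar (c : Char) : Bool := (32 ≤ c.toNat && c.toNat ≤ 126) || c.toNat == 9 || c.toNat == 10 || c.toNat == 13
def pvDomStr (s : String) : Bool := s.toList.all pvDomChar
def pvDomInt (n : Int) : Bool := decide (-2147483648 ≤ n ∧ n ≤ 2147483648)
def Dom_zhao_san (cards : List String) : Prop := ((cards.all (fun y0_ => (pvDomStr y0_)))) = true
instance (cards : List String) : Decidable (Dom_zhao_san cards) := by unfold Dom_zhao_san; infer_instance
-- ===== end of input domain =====

-- B replaces A's run accumulator with two staged scans (3-window search over a key array, then a backward scan for the trailing run start); alternative decomposition, same cost.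


-- ===== PORT A =====
-- flag(x): reads x[1]; Python raises IndexError on strings of length < 2 (excluded by Pre_), the port returns 0 there.
def zsFlag (x : String) : Int :=
  match PySem.Str.pyGet? x 1 with
  | some c =>
      if c = 'A' then 14
      else if c = '1' then 10
      else if c = 'J' then 11
      else if c = 'Q' then 12
      else if c = 'K' then 13
      else (c.toNat : Int) - 48
  | none => 0

-- the 'for i in range(len(cards)-1)' loop of A, with the break at len(s) == 3;
-- the fuel argument counts the remaining iterations (len(cards)-1-i), so indices stay in range
def zhaoLoop (cards : List String) (i : Nat) (s : List String) : Nat → List String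
  | 0 => s
  | n + 1 =>
    if zsFlag (cards.getD (i+1) "") = zsFlag (cards.getD i "") then
      if (s ++ [cards.getD (i+1) ""]).length = 3 then s ++ [cards.getD (i+1) ""]
      else zhaoLoop cards (i+1) (s ++ [cards.getD (i+1) ""]) n
    else zhaoLoop cards (i+1) (PySem.List.slice cards (some ((i:Int)+1)) (some ((i:Int)+2))) n

def zhao_san (cards : List String) : List String :=
  zhaoLoop cards 0 (PySem.List.slice cards (some 0) (some 1)) (cards.length - 1)

-- ===== PORT B =====
-- the 'for i in range(n - 2)' window scan of B; fuel = (n-2) - i remaining iterations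
def zsTripleLoop (keys : List Int) (cards : List String) (i : Nat) : Nat → Option (List String)
  | 0 => none
  | fuel + 1 =>
    if keys.getD i 0 = keys.getD (i+1) 0 ∧ keys.getD (i+1) 0 = keys.getD (i+2) 0 then
      some (PySem.List.slice cards (some (i : Int)) (some ((i : Int) + 3)))
    else zsTripleLoop keys cards (i+1) fuel

-- the 'while j > 0 and keys[j] == keys[j-1]: j -= 1' backward scan of B
def zsLastStart (keys : List Int) : Nat → Nat
  | 0 => 0
  | j + 1 => if keys.getD (j+1) 0 = keys.getD j 0 then zsLastStart keys j else j + 1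

-- keys = [flag(c) for c in cards] appears inlined as cards.map zsFlag
def zhao_san_alt (cards : List String) : List String :=
  match zsTripleLoop (cards.map zsFlag) cards 0 (cards.length - 2) with
  | some r => r
  | none =>
    match cards with
    | [] => []
    | _ :: _ =>
      PySem.List.slice cards (some ((zsLastStart (cards.map zsFlag) (cards.length - 1) : Nat) : Int)) none

-- ===== PRECONDITION & SPEC =====
-- Pre_ excludes lists containing a string of length < 2: flag's x[1] raises IndexError there
-- (A may still return when its break fires before reaching the short string, but B keys every
-- card up front and raises; see cite in claim.json).
def Pre_zhao_san (cards : List String) : Prop := ∀ x ∈ cards, 2 ≤ x.toList.length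
instance (cards : List String) : Decidable (Pre_zhao_san cards) := by unfold Pre_zhao_san; infer_instance
def pvWitness_zhao_san : List String := (["s3", "h3", "d7"])

def Spec_zhao_san (cards : List String) (out : List String) : Prop := out = zhao_san_alt cards
instance (cards : List String) (out : List String) : Decidable (Spec_zhao_san cards out) := by unfold Spec_zhao_san; infer_instance

-- ===== CLAIM (what is proved, stated in full; the proofs are below) =====
def Claim_equal_zhao_san : Prop := ∀ (cards : List String), Dom_zhao_san cards → Pre_zhao_san cards → Spec_zhao_san cards (zhao_san cards)

-- ===== LEMMAS AND PROOFS =====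

-- list-level restatement of A's loop: cur is cards[i], the rest is cards.drop (i+1)
def aList (cur : String) (s : List String) : List String → List String
  | [] => s
  | y :: ys =>
    if zsFlag y = zsFlag cur then
      if (s ++ [y]).length = 3 then s ++ [y] else aList y (s ++ [y]) ys
    else aList y [y] ys

-- list-level restatement of B's window scan: first window of three equal flags
def tripList : List String → Option (List String)
  | x :: y :: z :: r =>
    if zsFlag x = zsFlag y ∧ zsFlag y = zsFlag z then some [x, y, z]
    else tripList (y :: z :: r)
  | _ => none

-- list-level last maximal run of equal-flag cards
def lastRun : List String → List String
  | [] => []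
  | [x] => [x]
  | x :: y :: r =>
    if zsFlag x = zsFlag y ∧ (lastRun (y :: r)).length = (y :: r).length
    then x :: lastRun (y :: r) else lastRun (y :: r)

-- list-level B
def bList (xs : List String) : List String :=
  match tripList xs with
  | some r => r
  | none => lastRun xs

lemma lastRun_length_le : ∀ xs : List String, (lastRun xs).length ≤ xs.length := by
  intro xs
  induction xs with
  | nil => simp [lastRun]
  | cons x t ih =>
    cases t with
    | nil => simp [lastRun]
    | cons y r =>
      simp only [lastRun]
      split_ifs with h
      · simpa using ih
      · exact le_trans ih (by simp)

lemma lastRun_ne (x y : String) (l : List String) (h : ¬ zsFlag x = zsFlag y) :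
    lastRun (x :: y :: l) = lastRun (y :: l) := by
  simp [lastRun, h]

lemma tripList_short (l : List String) (h : l.length ≤ 2) : tripList l = none := by
  match l with
  | [] => rfl
  | [_] => rfl
  | [_, _] => rfl
  | _ :: _ :: _ :: _ => simp at h

-- MAIN: A's loop equals list-level B on the virtual full list s ++ rest,
-- for any accumulated run s of one or two equal-flag cards ending in cur
lemma aList_eq_bList : ∀ (rest s : List String) (cur : String),
    (s = [cur] ∨ ∃ a, s = [a, cur] ∧ zsFlag a = zsFlag cur) →
    aList cur s rest = bList (s ++ rest) := by
  intro rest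
  induction rest with
  | nil =>
    intro s cur hs
    rcases hs with h1 | ⟨a, h2, hfa⟩
    · subst h1; simp [aList, bList, tripList, lastRun]
    · subst h2; simp [aList, bList, tripList, lastRun, hfa]
  | cons y ys ih =>
    intro s cur hs
    by_cases hf : zsFlag y = zsFlag cur
    · rcases hs with h1 | ⟨a, h2, hfa⟩
      · subst h1
        have : aList cur [cur] (y :: ys) = aList y ([cur] ++ [y]) ys := by
          simp [aList, hf]
        rw [this, ih ([cur] ++ [y]) y (Or.inr ⟨cur, rfl, hf.symm⟩)]
        simp
      · subst h2
        have hA : aList cur [a, cur] (y :: ys) = [a, cur, y] := by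
          simp [aList, hf]
        have hB : bList ([a, cur] ++ y :: ys) = [a, cur, y] := by
          simp [bList, tripList, hfa, hf.symm]
        rw [hA, hB]
    · -- run breaks: both sides restart at y
      have step : aList cur s (y :: ys) = aList y [y] ys := by
        rcases hs with h1 | ⟨a, h2, _⟩ <;> subst_vars <;> simp [aList, hf]
      rw [step, ih [y] y (Or.inl rfl)]
      -- bList (s ++ y :: ys) = bList (y :: ys)
      have hfy : ¬ zsFlag cur = zsFlag y := fun h => hf h.symm
      rcases hs with h1 | ⟨a, h2, hfa⟩
      · subst h1
        have ht : tripList (cur :: y :: ys) = tripList (y :: ys) := by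
          cases ys with
          | nil => simp [tripList]
          | cons z zs => simp [tripList, hfy]
        have hl : lastRun (cur :: y :: ys) = lastRun (y :: ys) := lastRun_ne _ _ _ hfy
        simp [bList, ht, hl]
      · subst h2
        have ht : tripList (a :: cur :: y :: ys) = tripList (y :: ys) := by
          have h1 : tripList (a :: cur :: y :: ys) = tripList (cur :: y :: ys) := by
            simp [tripList, hfy]
          have h2 : tripList (cur :: y :: ys) = tripList (y :: ys) := by
            cases ys with
            | nil => simp [tripList]
            | cons z zs => simp [tripList, hfy]
          rw [h1, h2]
        have hl1 : lastRun (cur :: y :: ys) = lastRun (y :: ys) := lastRun_ne _ _ _ hfy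
        have hl : lastRun (a :: cur :: y :: ys) = lastRun (y :: ys) := by
          have hle := lastRun_length_le (y :: ys)
          have hlen : (lastRun (cur :: y :: ys)).length ≠ (cur :: y :: ys).length := by
            rw [hl1]
            intro hEq
            simp only [List.length_cons] at hEq hle
            omega
          simp only [lastRun]
          rw [if_neg (by exact fun h => hlen h.2)]
          exact hl1
        simp [bList, ht, hl]

-- keys lookup: getD on the mapped list is zsFlag of the element
lemma keys_getD (cards : List String) (k : Nat) (h : k < cards.length) :
    (cards.map zsFlag).getD k 0 = zsFlag (cards[k]'h) := by
  rw [List.getD_eq_getElem?_getD, List.getElem?_map, List.getElem?_eq_getElem h]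
  rfl

-- B's window loop computes tripList of the remaining suffix
lemma tripleLoop_eq (cards : List String) : ∀ (fuel i : Nat),
    fuel = cards.length - 2 - i →
    zsTripleLoop (cards.map zsFlag) cards i fuel = tripList (cards.drop i) := by
  intro fuel
  induction fuel with
  | zero =>
    intro i h
    have : (cards.drop i).length ≤ 2 := by simp; omega
    rw [tripList_short _ this]; rfl
  | succ n ihn =>
    intro i h
    have h0 : i < cards.length := by omega
    have h1 : i + 1 < cards.length := by omega
    have h2 : i + 2 < cards.length := by omega
    have hd : cards.drop i = cards[i] :: cards[i+1] :: cards[i+2] :: cards.drop (i+3) := by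
      rw [List.drop_eq_getElem_cons h0, List.drop_eq_getElem_cons h1, List.drop_eq_getElem_cons h2]
    show (if (cards.map zsFlag).getD i 0 = (cards.map zsFlag).getD (i+1) 0 ∧
            (cards.map zsFlag).getD (i+1) 0 = (cards.map zsFlag).getD (i+2) 0 then
        some (PySem.List.slice cards (some (i : Int)) (some ((i : Int) + 3)))
      else zsTripleLoop (cards.map zsFlag) cards (i+1) n) = _
    rw [keys_getD cards i h0, keys_getD cards (i+1) h1, keys_getD cards (i+2) h2, hd]
    have hslice : PySem.List.slice cards (some (i : Int)) (some ((i : Int) + 3))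
        = [cards[i], cards[i+1], cards[i+2]] := by
      have : ((i : Int) + 3) = ((i + 3 : Nat) : Int) := by push_cast; ring
      rw [this, PySem.List.slice_natCast]
      have hsub : i + 3 - i = 3 := by omega
      rw [hsub, List.drop_eq_getElem_cons h0, List.drop_eq_getElem_cons h1,
        List.drop_eq_getElem_cons h2]
      rfl
    simp only [tripList, hslice]
    by_cases hc : zsFlag cards[i] = zsFlag cards[i+1] ∧ zsFlag cards[i+1] = zsFlag cards[i+2]
    · rw [if_pos hc, if_pos hc]
    · rw [if_neg hc, if_neg hc, ihn (i+1) (by omega)]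
      rw [List.drop_eq_getElem_cons h1, List.drop_eq_getElem_cons h2]

lemma zsLastStart_le (keys : List Int) : ∀ j, zsLastStart keys j ≤ j := by
  intro j
  induction j with
  | zero => simp [zsLastStart]
  | succ n ih =>
    simp only [zsLastStart]
    split_ifs
    · omega
    · omega

-- shifting the backward scan past a prepended key
lemma zsLastStart_shift (k0 : Int) (ks : List Int) : ∀ j,
    zsLastStart (k0 :: ks) (j + 1)
      = if zsLastStart ks j = 0 ∧ ks.getD 0 0 = k0 then 0 else zsLastStart ks j + 1 := by
  intro j
  induction j with
  | zero =>
    show (if (k0 :: ks).getD 1 0 = (k0 :: ks).getD 0 0 then zsLastStart (k0 :: ks) 0 else 1) = _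
    simp only [List.getD_cons_succ, List.getD_cons_zero, zsLastStart]
    split_ifs <;> simp_all
  | succ n ih =>
    show (if (k0 :: ks).getD (n+2) 0 = (k0 :: ks).getD (n+1) 0
        then zsLastStart (k0 :: ks) (n+1) else n + 2) = _
    simp only [List.getD_cons_succ]
    have hr : zsLastStart ks (n + 1)
        = if ks.getD (n+1) 0 = ks.getD n 0 then zsLastStart ks n else n + 1 := rfl
    by_cases hc : ks.getD (n+1) 0 = ks.getD n 0
    · rw [if_pos hc, ih, hr, if_pos hc]
    · rw [if_neg hc, hr, if_neg hc]
      have : ¬ (n + 1 = 0 ∧ ks.getD 0 0 = k0) := by omega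
      rw [if_neg this]

-- the backward scan finds the start of the last run
lemma lastStart_drop : ∀ (cards : List String), cards ≠ [] →
    cards.drop (zsLastStart (cards.map zsFlag) (cards.length - 1)) = lastRun cards := by
  intro cards
  induction cards with
  | nil => intro h; exact absurd rfl h
  | cons x t ih =>
    intro _
    cases t with
    | nil => simp [zsLastStart, lastRun]
    | cons y r =>
      have hlen : (x :: y :: r).length - 1 = r.length + 1 := by simp
      have hmap : (x :: y :: r).map zsFlag = zsFlag x :: (y :: r).map zsFlag := rfl
      rw [hlen, hmap, zsLastStart_shift (zsFlag x) ((y :: r).map zsFlag) r.length]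
      have hK0 : ((y :: r).map zsFlag).getD 0 0 = zsFlag y := rfl
      have hIH : (y :: r).drop (zsLastStart ((y :: r).map zsFlag) ((y :: r).length - 1))
          = lastRun (y :: r) := ih (by simp)
      have hlen2 : (y :: r).length - 1 = r.length := by simp
      rw [hlen2] at hIH
      set m := zsLastStart ((y :: r).map zsFlag) r.length with hm
      by_cases hc : m = 0 ∧ ((y :: r).map zsFlag).getD 0 0 = zsFlag x
      · rw [if_pos hc]
        have hfy : zsFlag x = zsFlag y := by rw [← hK0, hc.2]
        have hall : lastRun (y :: r) = y :: r := by rw [← hIH, hc.1]; rfl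
        simp [lastRun, hfy, hall]
      · rw [if_neg hc]
        have hdrop : (x :: y :: r).drop (m + 1) = (y :: r).drop m := rfl
        rw [hdrop, hIH]
        -- show lastRun (x :: y :: r) = lastRun (y :: r)
        by_cases hfy : zsFlag x = zsFlag y
        · have hm0 : m ≠ 0 := fun h0 => hc ⟨h0, by rw [hK0, hfy]⟩
          have hmle : m ≤ r.length := zsLastStart_le _ _
          have hne : (lastRun (y :: r)).length ≠ (y :: r).length := by
            rw [← hIH]
            simp only [List.length_drop, List.length_cons]
            omega
          simp only [lastRun]
          rw [if_neg (by exact fun h => hne h.2)]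
        · exact (lastRun_ne _ _ _ hfy).symm

-- B's port equals list-level B
lemma alt_eq_bList (cards : List String) : zhao_san_alt cards = bList cards := by
  unfold zhao_san_alt
  rw [tripleLoop_eq cards (cards.length - 2) 0 (by omega), List.drop_zero]
  cases htrip : tripList cards with
  | some r => simp [bList, htrip]
  | none =>
    simp only [bList, htrip]
    cases cards with
    | nil => rfl
    | cons c cs =>
      have := lastStart_drop (c :: cs) (by simp)
      simp only []
      rw [PySem.List.slice_from_natCast]
      exact this

-- ====== A side: A's port equals aList (as in the standard index-to-list bridge) ======

lemma zhaoLoop_eq (cards : List String) : ∀ (n i : Nat) (s : List String)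
    (h : i < cards.length), n = cards.length - 1 - i →
    zhaoLoop cards i s n = aList (cards[i]'h) s (cards.drop (i+1)) := by
  intro n
  induction n with
  | zero =>
    intro i s h hn
    have : cards.drop (i+1) = [] := List.drop_eq_nil_of_le (by omega)
    rw [this]
    rfl
  | succ n ihn =>
    intro i s h hn
    have h2 : i + 1 < cards.length := by omega
    have hget1 : cards.getD (i+1) "" = cards[i+1] := List.getD_eq_getElem cards "" h2
    have hget0 : cards.getD i "" = cards[i] := List.getD_eq_getElem cards "" h
    have hdrop : cards.drop (i+1) = cards[i+1] :: cards.drop (i+1+1) :=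
      List.drop_eq_getElem_cons h2
    have hslice : PySem.List.slice cards (some ((i:Int)+1)) (some ((i:Int)+2)) = [cards[i+1]] := by
      have hc1 : ((i:Int)+1) = ((i+1 : Nat) : Int) := by push_cast; ring
      have hc2 : ((i:Int)+2) = ((i+2 : Nat) : Int) := by push_cast; ring
      rw [hc1, hc2, PySem.List.slice_natCast]
      have hsub : i + 2 - (i + 1) = 1 := by omega
      rw [hsub, List.drop_eq_getElem_cons h2]
      rfl
    rw [hdrop]
    show (if zsFlag (cards.getD (i+1) "") = zsFlag (cards.getD i "") then
        if (s ++ [cards.getD (i+1) ""]).length = 3 then s ++ [cards.getD (i+1) ""]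
        else zhaoLoop cards (i+1) (s ++ [cards.getD (i+1) ""]) n
      else zhaoLoop cards (i+1) (PySem.List.slice cards (some ((i:Int)+1)) (some ((i:Int)+2))) n) = _
    rw [hget1, hget0, hslice]
    simp only [aList]
    by_cases hf : zsFlag cards[i+1] = zsFlag cards[i]
    · rw [if_pos hf, if_pos hf]
      by_cases hl : (s ++ [cards[i+1]]).length = 3
      · rw [if_pos hl, if_pos hl]
      · rw [if_neg hl, if_neg hl]
        exact ihn (i+1) (s ++ [cards[i+1]]) h2 (by omega)
    · rw [if_neg hf, if_neg hf]
      exact ihn (i+1) [cards[i+1]] h2 (by omega)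

-- ===== VERDICT (by name: the statement is the Claim_ definition above) =====
theorem zhao_san_spec : Claim_equal_zhao_san := by
  intro cards _ _
  unfold Spec_zhao_san zhao_san
  rw [alt_eq_bList]
  cases cards with
  | nil => rfl
  | cons c cs =>
    have hslice : PySem.List.slice (c :: cs) (some 0) (some 1) = [c] := by
      rw [PySem.List.slice_zero_start, PySem.List.slice_to (c :: cs) (b := 1) (by norm_num)]
      rfl
    rw [hslice]
    rw [zhaoLoop_eq (c :: cs) ((c :: cs).length - 1) 0 [c] (by simp) (by omega)]
    exact aList_eq_bList cs [c] c (Or.inl rfl)
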